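-- pv_equiv track=rewrite | github.com/Koziev/verslibre | py/poetry/poetry_template.py | sanitize_line
-- ===== SOURCE A (Python) =====
-- def sanitize_line(line):
--     clean_text = []
--     icur = 0
--     l = len(line)
--     while icur < l:
--         c = line[icur]
--         icur += 1
--         if c != u'|':
--             clean_text.append(c)
--         else:
--             while icur < l:
--                 if line[icur] in u' ,:;-!?.—':
--                     break
--                 icur += 1
--
--     return u''.join(clean_text)
-- ===== SOURCE B (Python) =====
-- _DELIMS = ' ,:;-!?.\u2014'
--
-- def sanitize_line(line):
--     # split on '|'; each bar starts a skipped run ending at the first delimiter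
--     parts = line.split('|')
--     pieces = [parts[0]]
--     for part in parts[1:]:
--         kept = part
--         while kept and kept[0] not in _DELIMS:
--             kept = kept[1:]
--         pieces.append(kept)
--     return ''.join(pieces)
-- ===== Notes on version B (the rewrite author's own statement) =====
-- stated objective: idiomatic
-- what changed: Replaces A's manual index-driven character scan with a nested skip loop by splitting on the bar character, trimming each subsequent piece up to its first delimiter, and joining.
import Mathlib
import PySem

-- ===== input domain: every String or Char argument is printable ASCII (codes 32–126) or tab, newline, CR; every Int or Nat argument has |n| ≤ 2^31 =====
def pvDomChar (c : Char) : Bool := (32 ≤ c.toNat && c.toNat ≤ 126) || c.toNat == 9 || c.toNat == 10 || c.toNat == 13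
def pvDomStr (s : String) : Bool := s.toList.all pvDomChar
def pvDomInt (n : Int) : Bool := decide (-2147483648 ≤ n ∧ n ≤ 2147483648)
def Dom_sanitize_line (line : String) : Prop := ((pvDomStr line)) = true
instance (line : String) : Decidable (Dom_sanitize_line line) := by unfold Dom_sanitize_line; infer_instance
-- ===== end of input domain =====

-- B replaces A's manual index scan (with a nested skip loop) by split-on-'|' / trim-each-piece / join; same cost, more idiomatic.

-- ===== PORT A =====
-- the delimiter string u' ,:;-!?.—' of A
def pvDelimsA : List Char := [' ', ',', ':', ';', '-', '!', '?', '.', '—']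

-- A's inner 'while icur < l: if line[icur] in delims: break; icur += 1', as the suffix from icur
def skipA : List Char → List Char
  | [] => []
  | c :: rest => if pvDelimsA.contains c then c :: rest else skipA rest

theorem skipA_length_le (l : List Char) : (skipA l).length ≤ l.length := by
  induction l with
  | nil => simp [skipA]
  | cons c rest ih =>
    simp only [skipA]
    split
    · exact Nat.le_refl _
    · exact Nat.le_succ_of_le ih

-- A's outer while loop over the remaining characters, accumulating clean_text
def loopA : List Char → List Char
  | [] => []
  | c :: rest =>
    if c ≠ '|' then c :: loopA rest
    else loopA (skipA rest)
termination_by l => l.length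
decreasing_by
  · simp
  · exact Nat.lt_succ_of_le (skipA_length_le rest)

def sanitize_line (line : String) : String := String.mk (loopA line.toList)

-- ===== PORT B =====
def pvDelimsB : List Char := [' ', ',', ':', ';', '-', '!', '?', '.', '—']

-- Source B: 'while kept and kept[0] not in _DELIMS: kept = kept[1:]'
def trimB : List Char → List Char
  | [] => []
  | c :: rest => if pvDelimsB.contains c then c :: rest else trimB rest

-- Source B: parts = line.split('|') ported as List.splitOn (exact for a one-char separator);
-- the pieces list + ''.join as append of the mapped tail to the head
def sanitize_line_alt (line : String) : String :=
  match line.toList.splitOn '|' with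
  | [] => ""   -- unreachable: split always returns at least one piece
  | p :: ps => String.mk (p ++ (ps.map trimB).flatten)

-- ===== PRECONDITION & SPEC =====
def Spec_sanitize_line (line : String) (out : String) : Prop := out = sanitize_line_alt line
instance (line : String) (out : String) : Decidable (Spec_sanitize_line line out) := by unfold Spec_sanitize_line; infer_instance

-- ===== CLAIM (what is proved, stated in full; the proofs are below) =====
def Claim_equal_sanitize_line : Prop := ∀ (line : String), Dom_sanitize_line line → Spec_sanitize_line line (sanitize_line line)

-- ===== LEMMAS AND PROOFS =====

theorem splitOn_bar_ne_nil (l : List Char) : l.splitOn '|' ≠ [] := by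
  induction l with
  | nil => simp [List.splitOn, List.splitOnP_nil]
  | cons c rest ih =>
    simp only [List.splitOn, List.splitOnP_cons] at *
    split
    · simp
    · cases h : rest.splitOnP (· == '|') with
      | nil => exact absurd h ih
      | cons p ps => simp

-- the shape B builds from a split result
def glueB : List (List Char) → List Char
  | [] => []
  | p :: ps => p ++ (ps.map trimB).flatten

-- main invariant: A's outer loop equals B's split-and-trim glue, and after a skip it
-- equals the fully-trimmed glue
theorem loopA_glue : ∀ (n : Nat) (cs : List Char), cs.length ≤ n →
    loopA cs = glueB (cs.splitOn '|') ∧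
    loopA (skipA cs) = ((cs.splitOn '|').map trimB).flatten := by
  intro n
  induction n with
  | zero =>
    intro cs h
    have : cs = [] := List.eq_nil_of_length_eq_zero (Nat.le_zero.mp h)
    subst this
    simp [loopA, skipA, List.splitOn, List.splitOnP_nil, glueB, trimB]
  | succ n ih =>
    intro cs h
    cases cs with
    | nil => simp [loopA, skipA, List.splitOn, List.splitOnP_nil, glueB, trimB]
    | cons c rest =>
      have hr : rest.length ≤ n := Nat.lt_succ_iff.mp h
      obtain ⟨ih1, ih2⟩ := ih rest hr
      by_cases hc : c = '|'
      · subst hc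
        have hsplit : (('|' :: rest).splitOn '|') = [] :: rest.splitOn '|' := by
          simp [List.splitOn, List.splitOnP_cons]
        have hnd : pvDelimsA.contains '|' = false := by decide
        constructor
        · rw [hsplit]
          show loopA ('|' :: rest) = glueB ([] :: rest.splitOn '|')
          rw [loopA]
          simp only [ne_eq, not_true_eq_false, if_false, glueB, List.nil_append]
          exact ih2
        · rw [hsplit]
          show loopA (skipA ('|' :: rest)) = (([] :: rest.splitOn '|').map trimB).flatten
          rw [skipA, hnd]
          simp only [List.map_cons, List.flatten_cons, trimB, List.nil_append]
          exact ih2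
      · obtain ⟨p, ps, hps⟩ : ∃ p ps, rest.splitOn '|' = p :: ps := by
          cases h' : rest.splitOn '|' with
          | nil => exact absurd h' (splitOn_bar_ne_nil rest)
          | cons p ps => exact ⟨p, ps, rfl⟩
        have hsplit : ((c :: rest).splitOn '|') = (c :: p) :: ps := by
          simp only [List.splitOn, List.splitOnP_cons] at *
          have : (c == '|') = false := by simp [hc]
          rw [this]
          simp only [Bool.false_eq_true, if_false, hps, List.modifyHead]
        constructor
        · rw [hsplit]
          show loopA (c :: rest) = glueB ((c :: p) :: ps)
          rw [loopA]
          simp only [ne_eq, hc, not_false_eq_true, if_true, glueB, List.cons_append]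
          rw [ih1, hps]
          rfl
        · rw [hsplit]
          by_cases hd : pvDelimsA.contains c = true
          · have hskip : skipA (c :: rest) = c :: rest := by rw [skipA, hd]; simp
            rw [hskip, loopA]
            simp only [ne_eq, hc, not_false_eq_true, if_true]
            have htr : trimB (c :: p) = c :: p := by
              rw [trimB]
              have : pvDelimsB.contains c = true := hd
              rw [this]; simp
            simp only [List.map_cons, List.flatten_cons, htr]
            rw [ih1, hps]
            simp [glueB]
          · have hd' : pvDelimsA.contains c = false := by
              simpa using hd
            have hskip : skipA (c :: rest) = skipA rest := by rw [skipA, hd']; simp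
            rw [hskip, ih2, hps]
            have htr : trimB (c :: p) = trimB p := by
              rw [trimB]
              have : pvDelimsB.contains c = false := hd'
              rw [this]; simp
            simp only [List.map_cons, List.flatten_cons, htr]

-- ===== VERDICT (by name: the statement is the Claim_ definition above) =====
theorem sanitize_line_spec : Claim_equal_sanitize_line := by
  intro line _
  unfold Spec_sanitize_line sanitize_line sanitize_line_alt
  obtain ⟨p, ps, hps⟩ : ∃ p ps, line.toList.splitOn '|' = p :: ps := by
    cases h' : line.toList.splitOn '|' with
    | nil => exact absurd h' (splitOn_bar_ne_nil _)
    | cons p ps => exact ⟨p, ps, rfl⟩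
  rw [hps]
  have := (loopA_glue line.toList.length line.toList (Nat.le_refl _)).1
  rw [this, hps, glueB]
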